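-- pv_equiv track=rewrite | github.com/sarasmajic/Naloge-iz-p1 | IZPITI/Jan22/Jan22.py | uravnotezena
-- ===== SOURCE A (Python) =====
-- def uravnotezena(tovor):
--     ena_stran = []
--     druga_stran = []
--
--     for i in range(len(tovor)):
--         if i % 2 == 0:
--            ena_stran.append(tovor[i])
--         else:
--             if i % 2 != 0:
--                 druga_stran.append(tovor[i])
--
--     vsota_ena = 0
--     for e_ena in ena_stran:
--         vsota_ena += e_ena
--
--     vsota_druga = 0
--     for e_druga in druga_stran:
--         vsota_druga += e_druga
--
--     if vsota_druga > vsota_ena: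
--         razlika = vsota_druga - vsota_ena
--     else:
--         razlika = vsota_ena - vsota_druga
--
--     if razlika > 10:
--         return False
--     else:
--         return True
-- ===== SOURCE B (Python) =====
-- def uravnotezena(tovor):
--     total = 0
--     sign = 1
--     for x in tovor:
--         total += sign * x
--         sign = -sign
--     return abs(total) <= 10
-- ===== Notes on version B (the rewrite author's own statement) =====
-- stated objective: simpler
-- what changed: Replaces the two intermediate index-parity lists, two separate summing loops and an explicit difference comparison with a single pass keeping one signed net accumulator and returning abs(total) <= 10.
import Mathlib
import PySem

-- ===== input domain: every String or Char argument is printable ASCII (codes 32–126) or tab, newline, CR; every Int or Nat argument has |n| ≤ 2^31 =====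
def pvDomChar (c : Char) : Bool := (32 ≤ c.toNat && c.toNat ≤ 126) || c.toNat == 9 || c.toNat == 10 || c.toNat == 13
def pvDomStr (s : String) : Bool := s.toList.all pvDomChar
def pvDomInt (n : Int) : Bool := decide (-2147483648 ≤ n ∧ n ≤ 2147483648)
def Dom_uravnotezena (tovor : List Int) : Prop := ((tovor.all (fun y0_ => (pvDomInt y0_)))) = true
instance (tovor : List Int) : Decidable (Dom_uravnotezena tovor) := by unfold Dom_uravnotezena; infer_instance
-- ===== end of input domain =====

-- B changes the decomposition: one signed net accumulator in a single pass instead of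
-- two index-parity bins, two summing loops and an explicit difference comparison.

-- ===== PORT A =====
-- the body of A's index loop over range(len(tovor)) (state: the two bins)
def uravnotezenaBody (tovor : List Int) (st : List Int × List Int) (i : Int) :
    List Int × List Int :=
  if PySem.Int.mod i 2 = 0 then (st.1 ++ [PySem.List.pyGetD tovor i 0], st.2)
  else if PySem.Int.mod i 2 ≠ 0 then (st.1, st.2 ++ [PySem.List.pyGetD tovor i 0])
  else st

def uravnotezena (tovor : List Int) : Bool :=
  let st := (PySem.List.pyRange 0 (tovor.length : Int) 1).foldl (uravnotezenaBody tovor) ([], [])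
  let vsotaEna := st.1.foldl (fun a x => a + x) 0
  let vsotaDruga := st.2.foldl (fun a x => a + x) 0
  let razlika := if vsotaDruga > vsotaEna then vsotaDruga - vsotaEna else vsotaEna - vsotaDruga
  if razlika > 10 then false else true

-- ===== PORT B =====
def uravnotezena_alt (tovor : List Int) : Bool :=
  decide (|(tovor.foldl (fun (st : Int × Int) x => (st.1 + st.2 * x, -st.2)) (0, 1)).1| ≤ 10)

-- ===== PRECONDITION & SPEC =====
def Spec_uravnotezena (tovor : List Int) (out : Bool) : Prop := out = uravnotezena_alt tovor
instance (tovor : List Int) (out : Bool) : Decidable (Spec_uravnotezena tovor out) := by unfold Spec_uravnotezena; infer_instance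

-- ===== CLAIM (what is proved, stated in full; the proofs are below) =====
def Claim_equal_uravnotezena : Prop := ∀ (tovor : List Int), Dom_uravnotezena tovor → Spec_uravnotezena tovor (uravnotezena tovor)

-- ===== LEMMAS AND PROOFS =====

-- alternating sum with '+' first: the net quantity both programs compute
def altsum : List Int → Int
  | [] => 0
  | x :: xs => x - altsum xs

theorem foldB_fst (xs : List Int) : ∀ (t s : Int),
    (xs.foldl (fun (st : Int × Int) x => (st.1 + st.2 * x, -st.2)) (t, s)).1
      = t + s * altsum xs := by
  induction xs with
  | nil => intro t s; simp [altsum]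
  | cons x xs ih =>
      intro t s
      simp only [List.foldl_cons, altsum, ih]
      ring

theorem foldA_diff : ∀ (n : Nat) (full : List Int) (k : Nat), k + n = full.length →
    ∀ (e d : List Int),
      (((PySem.List.pyRange (k : Int) (full.length : Int) 1).foldl
          (uravnotezenaBody full) (e, d)).1.foldl (fun a x => a + x) 0)
        - (((PySem.List.pyRange (k : Int) (full.length : Int) 1).foldl
            (uravnotezenaBody full) (e, d)).2.foldl (fun a x => a + x) 0)
      = e.foldl (fun a x => a + x) 0 - d.foldl (fun a x => a + x) 0
          + (if k % 2 = 0 then 1 else -1) * altsum (full.drop k) := by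
  intro n
  induction n with
  | zero =>
      intro full k hk e d
      have h0 : (full.length : Int) ≤ (k : Int) := by omega
      rw [PySem.List.pyRange_one_eq_nil h0]
      have hd : full.drop k = [] := List.drop_eq_nil_of_le (by omega)
      simp [hd, altsum]
  | succ n ih =>
      intro full k hk e d
      have hk' : k < full.length := by omega
      have hlt : (k : Int) < (full.length : Int) := by exact_mod_cast hk'
      rw [PySem.List.pyRange_one_cons hlt]
      have hcast : (k : Int) + 1 = ((k + 1 : Nat) : Int) := by push_cast; ring
      rw [List.foldl_cons, hcast]
      have hdrop : full.drop k = full[k] :: full.drop (k + 1) :=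
        List.drop_eq_getElem_cons hk'
      have hget : PySem.List.pyGetD full (k : Int) 0 = full[k] := by
        rw [PySem.List.pyGetD_eq_getElem] <;> simp [hk']
      have hm' : PySem.Int.mod (k : Int) 2 = ((k % 2 : Nat) : Int) := by
        exact_mod_cast PySem.Int.mod_natCast k 2
      rcases Nat.even_or_odd k with he | ho
      · have hm : k % 2 = 0 := Nat.even_iff.mp he
        have hbody : uravnotezenaBody full (e, d) (k : Int)
            = (e ++ [full[k]], d) := by
          unfold uravnotezenaBody
          rw [hm', hm, hget]
          norm_num
        rw [hbody, ih full (k + 1) (by omega)]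
        rw [List.foldl_append, List.foldl_cons, List.foldl_nil, hdrop]
        simp only [altsum]
        rw [if_pos hm, if_neg (by omega : ¬ (k + 1) % 2 = 0)]
        ring
      · have hm : k % 2 = 1 := Nat.odd_iff.mp ho
        have hbody : uravnotezenaBody full (e, d) (k : Int)
            = (e, d ++ [full[k]]) := by
          unfold uravnotezenaBody
          rw [hm', hm, hget]
          norm_num
        rw [hbody, ih full (k + 1) (by omega)]
        rw [List.foldl_append, List.foldl_cons, List.foldl_nil, hdrop]
        simp only [altsum]
        rw [if_neg (by omega : ¬ k % 2 = 0), if_pos (by omega : (k + 1) % 2 = 0)]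
        ring

theorem A_eq (tovor : List Int) :
    uravnotezena tovor = decide (|altsum tovor| ≤ 10) := by
  have hA := foldA_diff tovor.length tovor 0 (by omega) [] []
  simp only [Nat.cast_zero, List.drop_zero, List.foldl_nil, Nat.zero_mod] at hA
  simp only [uravnotezena]
  set r := (PySem.List.pyRange 0 (tovor.length : Int) 1).foldl (uravnotezenaBody tovor) ([], []) with hr
  set eS := r.1.foldl (fun a x => a + x) 0 with heS
  set dS := r.2.foldl (fun a x => a + x) 0 with hdS
  have hT : eS - dS = altsum tovor := by rw [hA]; norm_num
  by_cases h : dS > eS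
  · rw [if_pos h]
    have habs : |altsum tovor| = dS - eS := by
      rw [← hT, abs_of_nonpos (by omega)]; ring
    rw [habs]
    by_cases h10 : dS - eS > 10
    · rw [if_pos h10]; symm; simp; omega
    · rw [if_neg h10]; symm; simp; omega
  · rw [if_neg h]
    have habs : |altsum tovor| = eS - dS := by
      rw [← hT, abs_of_nonneg (by omega)]
    rw [habs]
    by_cases h10 : eS - dS > 10
    · rw [if_pos h10]; symm; simp; omega
    · rw [if_neg h10]; symm; simp; omega

theorem B_eq (tovor : List Int) :
    uravnotezena_alt tovor = decide (|altsum tovor| ≤ 10) := by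
  simp only [uravnotezena_alt]
  rw [foldB_fst]
  norm_num

-- ===== VERDICT (by name: the statement is the Claim_ definition above) =====
theorem uravnotezena_spec : Claim_equal_uravnotezena := by
  intro tovor _
  unfold Spec_uravnotezena
  rw [A_eq, B_eq]
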